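-- pv_equiv track=rewrite | github.com/canemitz/advent-of-code | 2022/day18.py | num_cubes_adjacent
-- ===== SOURCE A (Python) =====
-- def num_cubes_adjacent(cube, cubes):
--     num_cubes_adjacent = 0
--
--     for test_cube in cubes:
--         if test_cube[:2] == cube[:2] and abs(test_cube[2] - cube[2]) == 1:
--             num_cubes_adjacent += 1
--         elif test_cube[1:3] == cube[1:3] and abs(test_cube[0] - cube[0]) == 1:
--             num_cubes_adjacent += 1
--         elif [test_cube[0], test_cube[2]] == [cube[0], cube[2]] and abs(test_cube[1] - cube[1]) == 1:
--             num_cubes_adjacent += 1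
--
--         if num_cubes_adjacent == 6:
--             break
--
--     return num_cubes_adjacent
-- ===== SOURCE B (Python) =====
-- def num_cubes_adjacent(cube, cubes):
--     # Build a multiplicity index of the cubes once, then query the six
--     # face-neighbor coordinates against it; cap at 6 like A's break.
--     counts = {}
--     for c in cubes:
--         key = (c[0], c[1], c[2])
--         counts[key] = counts.get(key, 0) + 1
--     x, y, z = cube[0], cube[1], cube[2]
--     total = 0
--     for n in [(x + 1, y, z), (x - 1, y, z),
--               (x, y + 1, z), (x, y - 1, z),
--               (x, y, z + 1), (x, y, z - 1)]:
--         total += counts.get(n, 0)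
--     return min(total, 6)
-- ===== Notes on version B (the rewrite author's own statement) =====
-- stated objective: alternative
-- what changed: Inverts the iteration: instead of scanning cubes and testing each against the query cube with per-axis branches (breaking at 6), B builds a multiplicity dictionary of all cubes in one pass and then sums the multiplicities of the six neighbor coordinates, capping with min(total, 6).
import Mathlib
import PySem

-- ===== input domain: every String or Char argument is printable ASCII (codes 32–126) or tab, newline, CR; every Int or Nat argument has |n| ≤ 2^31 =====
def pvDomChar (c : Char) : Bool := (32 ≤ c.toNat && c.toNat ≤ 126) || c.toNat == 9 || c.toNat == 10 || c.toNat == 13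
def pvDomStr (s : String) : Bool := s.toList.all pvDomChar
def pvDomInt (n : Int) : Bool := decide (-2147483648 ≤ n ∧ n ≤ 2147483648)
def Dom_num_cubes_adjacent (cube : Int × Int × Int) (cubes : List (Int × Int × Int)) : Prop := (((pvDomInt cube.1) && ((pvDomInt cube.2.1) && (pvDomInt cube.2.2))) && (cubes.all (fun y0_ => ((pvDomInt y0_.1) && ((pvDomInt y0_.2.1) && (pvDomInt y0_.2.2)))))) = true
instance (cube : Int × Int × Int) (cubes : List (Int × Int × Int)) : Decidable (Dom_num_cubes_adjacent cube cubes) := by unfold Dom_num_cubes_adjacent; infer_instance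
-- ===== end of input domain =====

-- B inverts the iteration: a multiplicity dictionary over cubes, then a sum over the six neighbor coordinates capped at 6; neither program mutates its arguments.

-- ===== PORT A =====
-- one iteration's increment: the three elif branches of A, in order
def pvStepA (cube c : Int × Int × Int) : Int :=
  if c.1 = cube.1 ∧ c.2.1 = cube.2.1 ∧ |c.2.2 - cube.2.2| = 1 then 1
  else if c.2.1 = cube.2.1 ∧ c.2.2 = cube.2.2 ∧ |c.1 - cube.1| = 1 then 1
  else if c.1 = cube.1 ∧ c.2.2 = cube.2.2 ∧ |c.2.1 - cube.2.1| = 1 then 1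
  else 0

-- the for-loop with its 'break' when the counter reaches 6
def pvLoopA (cube : Int × Int × Int) : List (Int × Int × Int) → Int → Int
  | [], n => n
  | c :: rest, n =>
    let n' := n + pvStepA cube c
    if n' = 6 then n' else pvLoopA cube rest n'

def num_cubes_adjacent (cube : Int × Int × Int) (cubes : List (Int × Int × Int)) : Int :=
  pvLoopA cube cubes 0

-- ===== PORT B =====
-- the dict built in B's first loop: counts[key] = counts.get(key, 0) + 1
def pvCounts (cubes : List (Int × Int × Int)) : PySem.Dict (Int × Int × Int) Int :=
  cubes.foldl (fun d c => d.insert c (d.getD c 0 + 1)) PySem.Dict.empty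

-- the list literal of the six face-neighbor coordinates in B's second loop
def pvNbrList (cube : Int × Int × Int) : List (Int × Int × Int) :=
  [(cube.1 + 1, cube.2.1, cube.2.2), (cube.1 - 1, cube.2.1, cube.2.2),
   (cube.1, cube.2.1 + 1, cube.2.2), (cube.1, cube.2.1 - 1, cube.2.2),
   (cube.1, cube.2.1, cube.2.2 + 1), (cube.1, cube.2.1, cube.2.2 - 1)]

def num_cubes_adjacent_alt (cube : Int × Int × Int) (cubes : List (Int × Int × Int)) : Int :=
  let counts := pvCounts cubes
  let total := (pvNbrList cube).foldl (fun t n => t + counts.getD n 0) 0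
  min total 6

-- ===== PRECONDITION & SPEC =====
def Spec_num_cubes_adjacent (cube : Int × Int × Int) (cubes : List (Int × Int × Int)) (out : Int) : Prop := out = num_cubes_adjacent_alt cube cubes
instance (cube : Int × Int × Int) (cubes : List (Int × Int × Int)) (out : Int) : Decidable (Spec_num_cubes_adjacent cube cubes out) := by unfold Spec_num_cubes_adjacent; infer_instance

-- ===== CLAIM =====
def Claim_equal_num_cubes_adjacent : Prop := ∀ (cube : Int × Int × Int) (cubes : List (Int × Int × Int)), Dom_num_cubes_adjacent cube cubes → Spec_num_cubes_adjacent cube cubes (num_cubes_adjacent cube cubes)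

-- ===== LEMMAS AND PROOFS =====

-- A's branch chain increments by 1 exactly when the cube is one of the six face neighbors
lemma pvStepA_eq (cube c : Int × Int × Int) :
    pvStepA cube c = if c ∈ pvNbrList cube then 1 else 0 := by
  obtain ⟨x, y, z⟩ := cube
  obtain ⟨a, b, d⟩ := c
  have e1 : ∀ u v : Int, |u - v| = 1 ↔ (u = v + 1 ∨ u = v - 1) := by
    intro u v; rw [abs_eq (by norm_num : (0:Int) ≤ 1)]; omega
  have key : (a, b, d) ∈ pvNbrList (x, y, z) ↔
      (a = x + 1 ∧ b = y ∧ d = z) ∨ (a = x - 1 ∧ b = y ∧ d = z) ∨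
      (a = x ∧ b = y + 1 ∧ d = z) ∨ (a = x ∧ b = y - 1 ∧ d = z) ∨
      (a = x ∧ b = y ∧ d = z + 1) ∨ (a = x ∧ b = y ∧ d = z - 1) := by
    simp [pvNbrList, Prod.ext_iff]
  simp only [pvStepA, e1]
  by_cases hD : (a = x + 1 ∧ b = y ∧ d = z) ∨ (a = x - 1 ∧ b = y ∧ d = z) ∨
      (a = x ∧ b = y + 1 ∧ d = z) ∨ (a = x ∧ b = y - 1 ∧ d = z) ∨
      (a = x ∧ b = y ∧ d = z + 1) ∨ (a = x ∧ b = y ∧ d = z - 1)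
  · rw [if_pos (key.mpr hD)]
    split_ifs <;> omega
  · rw [if_neg (fun h => hD (key.mp h))]
    split_ifs <;> omega

-- loop invariant: below the cap, A's break-at-6 loop computes min (n + count, 6)
lemma pvLoopA_eq (cube : Int × Int × Int) (l : List (Int × Int × Int)) :
    ∀ n : Int, n < 6 →
      pvLoopA cube l n = min (n + (l.countP (fun c => decide (c ∈ pvNbrList cube)) : Int)) 6 := by
  induction l with
  | nil => intro n hn; simp [pvLoopA]; omega
  | cons c rest ih =>
    intro n hn
    simp only [pvLoopA, List.countP_cons, pvStepA_eq]
    by_cases hc : c ∈ pvNbrList cube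
    · simp only [hc, decide_true, if_true]
      by_cases h6 : n + 1 = 6
      · rw [if_pos h6]
        push_cast
        omega
      · rw [if_neg h6, ih (n + 1) (by omega)]
        push_cast
        omega
    · simp only [hc, decide_false, Bool.false_eq_true, if_false, add_zero]
      rw [if_neg (by omega : ¬ n = 6), ih n hn]

-- the dict of B's first loop indexes multiplicities: counts[k] = cubes.count k
lemma pvCounts_getD (cubes : List (Int × Int × Int)) (k : Int × Int × Int) :
    (pvCounts cubes).getD k 0 = (cubes.count k : Int) := by
  rw [pvCounts, PySem.Dict.getD_foldl_insert_add_one, PySem.Dict.getD_empty]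
  simp

-- a fold of additions is init plus the sum of the mapped list
lemma foldl_add_eq_sum {α : Type} (f : α → Int) (l : List α) :
    ∀ init : Int, l.foldl (fun t n => t + f n) init = init + (l.map f).sum := by
  induction l with
  | nil => intro init; simp
  | cons x xs ih => intro init; simp [List.foldl_cons, ih]; ring

-- pushing a new element onto xs adds its multiplicity in ks to the sum
lemma map_count_cons (ks : List (Int × Int × Int)) (x : Int × Int × Int)
    (xs : List (Int × Int × Int)) :
    (ks.map (x :: xs).count).sum = (ks.map xs.count).sum + ks.count x := by
  have h : ks.map (x :: xs).count = ks.map (fun a => xs.count a + if x = a then 1 else 0) := by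
    refine List.map_congr_left (fun a _ => ?_)
    rw [List.count_cons]
    by_cases hk : a = x
    · subst hk; simp
    · simp [Ne.symm hk]
  rw [h]
  induction ks with
  | nil => simp
  | cons k ks ihk =>
    simp only [List.map_cons, List.sum_cons, List.count_cons, ihk, beq_iff_eq]
    by_cases hk : x = k
    · subst hk; simp; omega
    · rw [if_neg hk, if_neg (fun h => hk h.symm)]; omega

-- summing multiplicities over a duplicate-free key list counts membership
lemma sum_count_eq_countP (ks : List (Int × Int × Int)) (hnd : ks.Nodup)
    (xs : List (Int × Int × Int)) :
    (ks.map xs.count).sum = xs.countP (fun c => decide (c ∈ ks)) := by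
  induction xs with
  | nil =>
    rw [List.countP_nil]
    induction ks with
    | nil => simp
    | cons k ks ihk => simp [List.count_nil] at *
  | cons x xs ih =>
    rw [List.countP_cons, map_count_cons, ih]
    by_cases hx : x ∈ ks
    · rw [List.count_eq_one_of_mem hnd hx]; simp [hx]
    · rw [List.count_eq_zero_of_not_mem hx]; simp [hx]

-- casting a sum of Nat multiplicities to Int
lemma sum_map_cast (ks xs : List (Int × Int × Int)) :
    (ks.map (fun n => ((xs.count n : Nat) : Int))).sum = ((ks.map xs.count).sum : Int) := by
  induction ks with
  | nil => simp
  | cons k ks ihk => simp [ihk]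

-- the six neighbor coordinates are pairwise distinct
lemma pvNbrList_nodup (cube : Int × Int × Int) : (pvNbrList cube).Nodup := by
  obtain ⟨x, y, z⟩ := cube
  simp [pvNbrList, Prod.ext_iff]
  omega

-- ===== VERDICT =====
theorem num_cubes_adjacent_spec : Claim_equal_num_cubes_adjacent := by
  intro cube cubes _
  show num_cubes_adjacent cube cubes = num_cubes_adjacent_alt cube cubes
  rw [num_cubes_adjacent, pvLoopA_eq cube cubes 0 (by norm_num), num_cubes_adjacent_alt]
  simp only [foldl_add_eq_sum (fun n => (pvCounts cubes).getD n 0)]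
  have h1 : (pvNbrList cube).map (fun n => (pvCounts cubes).getD n 0)
      = (pvNbrList cube).map (fun n => ((cubes.count n : Nat) : Int)) :=
    List.map_congr_left (fun n _ => pvCounts_getD cubes n)
  rw [h1, sum_map_cast, sum_count_eq_countP (pvNbrList cube) (pvNbrList_nodup cube) cubes]
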